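/- GENERATED by farm/worked/mk_tree_copies.py from farm/worked/start_packet/Proof.lean (a worked proof of the farm's unit `start_packet`,
   accepted by the verdict) — do not edit. -/
/-
  `start_packet` (CONTRACTS 64; stb_vorbis_fixed.c:1531): `while (f->next_seg == -1) { if (!start_page(f)) return FALSE;
  if (f->page_flag & PAGEFLAG_continued_packet) return error(f, 32); }` then `last_seg = valid_bits = packet_bytes = bytes_in_seg = 0`.

      112da0 push rbx ; mov rbx, rdi
      112da4 L: load4 [rbx+0x6d8] ; cmp …, -1 ; jne 112de9
      112db9 mov rdi, rbx ; call start_page ; 112dc1 test eax, eax ; je 112e43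
      112dc5 load1 [rbx+0x6d3] ; test …, 1 ; je L ; 112dda mov esi, 32 ; mov rdi, rbx ; call error ; jmp 112e43
      112de9 four checked stores ; mov eax, 1 ; 112e43 pop rbx ; ret

  THE LOOP INVARIANT at `L` (= `Vorbis.L.start_packet.loop1`), `u` the entry state, `s` the state at the head, `f = u.rdi`:
      rbx = f · rsp = u.rsp − 8 · the code span · hsame : SameExcept (208 bytes of stack :: `Reader.winsStart f` as a literal list)
      hun : ShadowUntouched · hs1 / hs0 : the saved rbx and the return address · hdf, hmx · hrp : ReaderPost Blk len u.mem s.mem f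
  MEASURE: μ (`fun v => mu v.mem f`): the back edge is reached only after a successful start_page (`StartPagePost.started`:
  μ strictly smaller); the pushes of return addresses in between do not change μ. Three `ret` paths: `v_returned` once, the
  other two by `Returned.mk`. After every call the walker's `w_rdi_<addr>` / `w_rsp_<addr>` give the callee-entry state's rdi and rsp.
-/
import Asan.CheckWalk
import Vorbis.Spec.ReaderLemmas
import Vorbis.Spec.Units.start_packet

open X86 X86.User Asan Vorbis

set_option maxRecDepth 4000
set_option maxHeartbeats 4000000


/-- `start_packet(f)` satisfies its contract: a loop on the measure μ around `start_page` (at most one full round), the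
`error(f, 32)` exit, and the four checked stores that open the packet. -/
theorem Vorbis.Spec.Worked.start_packet_ok : Vorbis.Spec.start_packet.Statement := by
  intro Lay hLay μ hμ u₀ hcode hload4 h_sp hload1 h_err hstore4 hstore1 others frames Blk len u ret he hpre
  v_entry he
  have hsp_c := h_sp others frames Blk len
  have herr := h_err others frames
  have hsp := hpre.shadow.rsp
  have hwhere := hpre.where_obj
  have hL : BlkLive Blk (Live (stackObjs frames ++ others)) := hpre.env.live
  -- 112da0 push rbx ; mov rbx, rdi
  u_walk hcode [hμ.vendor] until [Vorbis.L.start_packet.loop1] span [Vorbis.L.textLo, Vorbis.L.textHi] side (v_side)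
  -- 112da4, the loop head
  have hsame : Mem.SameExcept (⟨(u.reg .rsp).toNat - 208, (u.reg .rsp).toNat⟩ :: Vorbis.Spec.Reader.winsStart (u.reg .rdi).toNat)
      u.mem s_112da1.mem := by
    simp only [Vorbis.Spec.Reader.winsStart]
    u_same
  simp only [Vorbis.Spec.Reader.winsStart] at hsame
  have hun : ShadowUntouched u.mem s_112da1.mem := by v_untouched
  have hs1 : UInt64.ofNat (s_112da1.mem.readLE (u.reg .rsp - 8) 8) = u.reg .rbx := by u_resolve
  have hs0 : UInt64.ofNat (s_112da1.mem.readLE (u.reg .rsp) 8) = ret := by u_resolve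
  have hdf : s_112da1.flags .df = false := by
    rw [w_flags]
    exact he_df
  have hmx : s_112da1.mxcsr &&& 8064 = 8064 := by
    rw [w_mxcsr]
    exact he_mx
  have hkeep := Vorbis.Spec.Reader.store_off_obj hpre.bits (u.reg .rsp - 8) 8 (u.reg .rbx).toNat
    (by u_omega) (by u_omega)
  rw [← w_mem] at hkeep
  have hrp := hkeep.1
  clear hkeep
  replace w_kept := w_kept.mono_all (S' := [.rbx, .rsp, .rdi, .rax, .rcx, .rdx, .rsi, .r8, .r9, .r10, .r11,
    .r16, .r17, .r18, .r19, .r20, .r21, .r22, .r23, .r24, .r25, .r26, .r27, .r28, .r29, .r30, .r31]) (by rfl)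
  clear w_mem w_flags w_mxcsr
  u_loop (fun v => Vorbis.mu v.mem (u.reg .rdi).toNat)
  u_walk hcode [hμ.vendor] until [Vorbis.L.start_packet.loop1] span [Vorbis.L.textLo, Vorbis.L.textHi] side (v_side)
  case check_112dab =>
    -- load4 [f + 0x6d8] (`f->next_seg`): a field of `*f`
    have hun' : ShadowUntouched u.mem s_112dab.mem := by v_untouched
    have hs := hpre.bits.site_field hL 1752 4 (by omega) (by omega) rfl
    exact Vorbis.Spec.check_site hpre.shadow.inv hun' hs (by u_omega)
  case check_112df0 =>
    -- store4 [f + 0x6dc] (`f->last_seg`)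
    have hun' : ShadowUntouched u.mem s_112df0.mem := by v_untouched
    have hs := hpre.bits.site_field hL 1756 4 (by omega) (by omega) rfl
    exact Vorbis.Spec.check_site hpre.shadow.inv hun' hs (by u_omega)
  case check_112e06 =>
    -- store4 [f + 0x6e8] (`f->valid_bits`)
    have hun' : ShadowUntouched u.mem s_112e06.mem := by v_untouched
    have hs := hpre.bits.site_field hL 1768 4 (by omega) (by omega) rfl
    exact Vorbis.Spec.check_site hpre.shadow.inv hun' hs (by u_omega)
  case check_112e1c =>
    -- store4 [f + 0x6ec] (`f->packet_bytes`)
    have hun' : ShadowUntouched u.mem s_112e1c.mem := by v_untouched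
    have hs := hpre.bits.site_field hL 1772 4 (by omega) (by omega) rfl
    exact Vorbis.Spec.check_site hpre.shadow.inv hun' hs (by u_omega)
  case check_112e32 =>
    -- store1 [f + 0x6d4] (`f->bytes_in_seg`)
    have hun' : ShadowUntouched u.mem s_112e32.mem := by v_untouched
    have hs := hpre.bits.site_field hL 1748 1 (by omega) (by omega) rfl
    exact Vorbis.Spec.check_site hpre.shadow.inv hun' hs (by u_omega)
  case call_inv =>
    refine Vorbis.abiInv_of ?_ ?_
    · rw [w_flags]
      simp only [X86.User.df_setStatus]
      exact w_df_112dab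
    · rw [w_mxcsr]
      exact hmx
  case pre_112dbc =>
    -- `start_page(f)`: `Bits` over the push of the return address; `next_seg = −1` (the `jne` was not taken)
    have hun' : ShadowUntouched u.mem s_112dbc.mem := by v_untouched
    have hsh' : ShadowPre others frames s_112dbc :=
      hpre.shadow.call hun' (by u_omega) (by u_omega) (by u_omega)
    have hk := Vorbis.Spec.Paging.push_off_obj hrp.bits (u.reg .rsp - 16) 8 1125825 (by u_omega) (by u_omega)
    rw [← w_mem] at hk
    have hns := (Vorbis.Spec.Paging.next_seg_test s_112da1.mem (u.reg .rdi)).mpr hbr_112db7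
    refine ⟨hpre.again hsh' w_rdi hk.1.bits, ?_⟩
    left
    rw [w_rdi, hk.2]
    exact hns
  · -- 112de9 … 112e44: the exit of the loop (`next_seg ≠ −1`), the four checked stores, `mov eax, 1 ; pop rbx ; ret`
    have hns : stb_vorbis.next_seg s_112da1.mem (u.reg .rdi).toNat ≠ -1 := by
      intro h
      exact hbr_112db7 ((Vorbis.Spec.Paging.next_seg_test s_112da1.mem (u.reg .rdi)).mp h)
    have hfin := Vorbis.Spec.Paging.after_stores (mem' := s_112e44.mem) (u.reg .rdi) rfl hrp.bits
      (by u_memnorm; u_eqon) (by u_memnorm; u_eqon) (by u_memnorm; u_eqon)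
      (by rw [w_mem]; u_read) (by rw [w_mem]; u_read) (by rw [w_mem]; u_read) (by rw [w_mem]; u_read)
    have hunF : ShadowUntouched u.mem s_112e44.mem := by v_untouched
    refine ReachVia.done (Or.inl ?_)
    clear hs1 hs0 he_retAddr
    v_returned
    show Vorbis.Spec.StartPacketPost Blk len (u.reg .rdi).toNat u s_112e44
    obtain ⟨hrpF, e4, v1, v2, v3, v4⟩ := hfin
    refine ⟨hunF, hrp.trans hrpF, Or.inr w_rax, ?_⟩
    intro _
    refine ⟨?_, v1, v2, v3, v4⟩
    rw [e4]
    exact hns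
  · -- 112dc1, after `start_page(f)`
    have hp := w_post
    have c_rdi := w_rdi_112dbc
    have c_rsp := w_rsp_112dbc
    have w_eq := Vorbis.conv_code_eqOn w_code
    simp only [X86.User.Spec.footprint, vspec, c_rsp, c_rdi] at w_same
    have hpostS : Vorbis.Spec.StartPagePost Blk len (u.reg .rdi).toNat s_112dbc s_112dbcr := by
      rw [← c_rdi]
      exact hp
    have hk := Vorbis.Spec.Paging.push_off_obj hrp.bits (u.reg .rsp - 16) 8 1125825 (by u_omega) (by u_omega)
    rw [← w_mem_112dbc] at hk
    rw [w_mem_112dbc] at w_same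
    -- the invariant's clauses at the returned state
    have hs1r : UInt64.ofNat (s_112dbcr.mem.readLE (u.reg .rsp - 8) 8) = u.reg .rbx := by u_frame hs1
    have hs0r : UInt64.ofNat (s_112dbcr.mem.readLE (u.reg .rsp) 8) = ret := by u_frame hs0
    have hunr : ShadowUntouched u.mem s_112dbcr.mem := by v_untouched
    have hdfr : s_112dbcr.flags .df = false := (show X86.User.abiInv _ from w_inv).1
    have hmxr : s_112dbcr.mxcsr &&& 8064 = 8064 := (show X86.User.abiInv _ from w_inv).2
    have hrpr : ReaderPost Blk len u.mem s_112dbcr.mem (u.reg .rdi).toNat := (hrp.trans hk.1).trans hpostS.reader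
    have hsamer : Mem.SameExcept
        [⟨(u.reg .rsp).toNat - 208, (u.reg .rsp).toNat⟩,
         ⟨(u.reg .rdi).toNat + 48, (u.reg .rdi).toNat + 56⟩, ⟨(u.reg .rdi).toNat + 84, (u.reg .rdi).toNat + 96⟩,
         ⟨(u.reg .rdi).toNat + 136, (u.reg .rdi).toNat + 144⟩, ⟨(u.reg .rdi).toNat + 1484, (u.reg .rdi).toNat + 1749⟩,
         ⟨(u.reg .rdi).toNat + 1752, (u.reg .rdi).toNat + 1760⟩, ⟨(u.reg .rdi).toNat + 1768, (u.reg .rdi).toNat + 1784⟩]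
        u.mem s_112dbcr.mem := by
      refine Vorbis.Spec.Reader.sameExcept_through_callee ?_ w_same ?_
      · u_same
      · simp only [List.forall_mem_cons, List.not_mem_nil, false_imp_iff, implies_true, and_true, X86.User.inSpans_cons,
          X86.User.inSpans_nil, or_false]
        repeat' apply And.intro
        all_goals u_omega
    -- a successful start_page lowers μ strictly (the measure of the loop)
    have hmu1 : s_112dbcr.reg .rax = 1 →
        mu s_112dbcr.mem (u.reg .rdi).toNat < mu s_112da1.mem (u.reg .rdi).toNat := by
      intro h1
      have h2 := (hpostS.started h1).2
      have h3 := hk.1.mu_le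
      omega
    have hres := hpostS.result
    obtain ⟨z, w_rax⟩ : ∃ z, s_112dbcr.reg .rax = z := ⟨_, rfl⟩
    rw [w_rax] at hmu1 hres
    clear w_same hk hpostS hp hs1 hs0 hsame hun hrp
    u_walk hcode [hμ.vendor] until [Vorbis.L.start_packet.loop1] span [Vorbis.L.textLo, Vorbis.L.textHi] side (v_side)
    case check_112dcc =>
      -- load1 [f + 0x6d3] (`f->page_flag`): a field of `*f`
      have hun' : ShadowUntouched u.mem s_112dcc.mem := by v_untouched
      have hs := hpre.bits.site_field hL 1747 1 (by omega) (by omega) rfl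
      exact Vorbis.Spec.check_site hpre.shadow.inv hun' hs (by u_omega)
    case call_inv =>
      refine Vorbis.abiInv_of ?_ ?_
      · rw [w_flags]
        simp only [X86.User.df_setStatus]
        exact w_df_112dcc
      · rw [w_mxcsr]
        exact hmxr
    case pre_112de2 =>
      -- `error(f, 32)`: the shadow clause and the `obj` clause
      have hun' : ShadowUntouched u.mem s_112de2.mem := by v_untouched
      have hsh' : ShadowPre others frames s_112de2 :=
        hpre.shadow.call hun' (by u_omega) (by u_omega) (by u_omega)
      refine ⟨hsh', ?_⟩
      rw [w_rdi]
      exact hpre.env.obj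
    · -- 112e43 pop rbx ; ret: start_page returned 0
      have hz0 : z = 0 := by
        rcases hres with h | h
        · exact h
        · exfalso
          rw [h] at hbr_112dc3
          exact absurd hbr_112dc3 (by decide)
      refine ReachVia.done (Or.inl ?_)
      clear hs1r hs0r he_retAddr
      refine X86.User.Returned.mk w_rip w_rsp ?_ ?_ (Vorbis.conv_code_in w_eq) ?_ ?_
      · u_saved
      · simp only [X86.User.Spec.footprint, vspec]
        u_same
      · v_inv
      show Vorbis.Spec.StartPacketPost Blk len (u.reg .rdi).toNat u s_112e44
      rw [← w_mem] at hunr hrpr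
      refine ⟨hunr, hrpr, Or.inl (w_rax.trans hz0), ?_⟩
      intro h1
      rw [w_rax, hz0] at h1
      exact absurd h1 (by decide)
    · -- 112dd8, the back edge (`je 112da4` taken: the page is not a continuation): start_page returned 1, μ is smaller
      have hz1 : z = 1 := by
        rcases hres with h | h
        · exfalso
          rw [h] at hbr_112dc3
          exact hbr_112dc3 rfl
        · exact h
      have hk := Vorbis.Spec.Paging.push_off_obj hrpr.bits (u.reg .rsp - 16) 8 1125841 (by u_omega) (by u_omega)
      rw [← w_mem] at hk
      have hlt := hmu1 hz1
      u_loop_back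
      · -- still no store to the shadow
        v_untouched
      · -- the direction flag: the check kept it, `test` writes status flags only
        rw [w_flags]
        simp only [X86.User.df_setStatus]
        exact w_df_112dcc
      · rw [w_mxcsr]
        exact hmxr
      · exact hrpr.trans hk.1
      · -- the measure
        have h3 := hk.1.mu_le
        omega
    · -- 112de7, after `error(f, 32)` (the page continues a packet): jmp 112e43 ; pop rbx ; ret
      have hp := w_post
      have c_rdi' := w_rdi_112de2
      have c_rsp' := w_rsp_112de2
      obtain ⟨hrax, hunE, hstored⟩ := hp
      have w_eq := Vorbis.conv_code_eqOn w_code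
      simp only [X86.User.Spec.footprint, vspec, c_rsp', c_rdi'] at w_same
      have hk := Vorbis.Spec.Paging.push_off_obj hrpr.bits (u.reg .rsp - 16) 8 1125863 (by u_omega) (by u_omega)
      rw [← w_mem_112de2] at hk
      -- `error` writes `[f + 140, f + 144)` only
      have hkE := Vorbis.Spec.Paging.reader_of_footprint hk.1.bits w_same (by
        simp only [List.mem_cons, List.mem_nil_iff, or_false, forall_eq_or_imp, forall_eq]
        repeat' apply And.intro
        all_goals u_omega)
      rw [w_mem_112de2] at w_same
      have hs1e : UInt64.ofNat (s_112de2r.mem.readLE (u.reg .rsp - 8) 8) = u.reg .rbx := by u_frame hs1r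
      have hs0e : UInt64.ofNat (s_112de2r.mem.readLE (u.reg .rsp) 8) = ret := by u_frame hs0r
      have hune : ShadowUntouched u.mem s_112de2r.mem := by v_untouched
      have hsamee : Mem.SameExcept
          [⟨(u.reg .rsp).toNat - 208, (u.reg .rsp).toNat⟩,
           ⟨(u.reg .rdi).toNat + 48, (u.reg .rdi).toNat + 56⟩, ⟨(u.reg .rdi).toNat + 84, (u.reg .rdi).toNat + 96⟩,
           ⟨(u.reg .rdi).toNat + 136, (u.reg .rdi).toNat + 144⟩, ⟨(u.reg .rdi).toNat + 1484, (u.reg .rdi).toNat + 1749⟩,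
           ⟨(u.reg .rdi).toNat + 1752, (u.reg .rdi).toNat + 1760⟩, ⟨(u.reg .rdi).toNat + 1768, (u.reg .rdi).toNat + 1784⟩]
          u.mem s_112de2r.mem := by
        refine Vorbis.Spec.Reader.sameExcept_through_callee ?_ w_same ?_
        · u_same
        · simp only [List.forall_mem_cons, List.not_mem_nil, false_imp_iff, implies_true, and_true, X86.User.inSpans_cons,
            X86.User.inSpans_nil, or_false]
          repeat' apply And.intro
          all_goals u_omega
      have hdfe : s_112de2r.flags .df = false := (show X86.User.abiInv _ from w_inv).1
      have hmxe : s_112de2r.mxcsr &&& 8064 = 8064 := (show X86.User.abiInv _ from w_inv).2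
      have hrpe : ReaderPost Blk len u.mem s_112de2r.mem (u.reg .rdi).toNat := (hrpr.trans hk.1).trans hkE.1
      clear w_same hs1r hs0r hk hkE hsamer hmu1
      u_walk hcode [hμ.vendor] until [Vorbis.L.start_packet.loop1] span [Vorbis.L.textLo, Vorbis.L.textHi] side (v_side)
      -- 112e44, the state after the `ret`
      refine ReachVia.done (Or.inl ?_)
      clear hs1e hs0e he_retAddr
      refine X86.User.Returned.mk w_rip w_rsp ?_ ?_ (Vorbis.conv_code_in w_eq) ?_ ?_
      · u_saved
      · simp only [X86.User.Spec.footprint, vspec]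
        u_same
      · v_inv
      show Vorbis.Spec.StartPacketPost Blk len (u.reg .rdi).toNat u s_112e44
      rw [← w_mem] at hune hrpe
      refine ⟨hune, hrpe, Or.inl w_rax, ?_⟩
      intro h1
      rw [w_rax] at h1
      exact absurd h1 (by decide)


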